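-- pv_equiv track=rewrite | github.com/CursiveCrow/Cantrip | Cursive-Language-Specification/Draft_01/compile_specification.py | remove_metadata_header
-- ===== SOURCE A (Python) =====
-- def remove_metadata_header(content: str) -> str:
--     """Remove the document metadata header but preserve chapter headings."""
--     lines = content.split('\n')
--     result = []
--     in_header = False
--     header_found = False
--     clause_heading_saved = False
--
--     for i, line in enumerate(lines):
--         # Detect start of metadata header (first # line)
--         if not header_found and line.strip().startswith('# '):
--             in_header = True
--             header_found = True
--             continue
--
--         # Preserve the chapter heading (## Clause X — ...)
--         if in_header and line.strip().startswith('## Clause '):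
--             result.append(line)
--             clause_heading_saved = True
--             # Add a blank line after the chapter heading
--             result.append('')
--             continue
--
--         # Detect end of metadata header
--         if in_header and line.strip() == '---':
--             in_header = False
--             # Skip any blank lines after the separator
--             j = i + 1
--             while j < len(lines) and not lines[j].strip():
--                 j += 1
--             # Skip to the position after blank lines
--             continue
--
--         # Skip lines within header
--         if in_header:
--             continue
--
--         result.append(line)
--
--     return '\n'.join(result)
-- ===== SOURCE B (Python) =====
-- def _find_header(lines):
--     # index of the first line whose stripped form starts with '# ', else None
--     for i, ln in enumerate(lines):
--         if ln.strip().startswith('# '):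
--             return i
--     return None
--
--
-- def _scan(clauses, rest):
--     # walk the header body: collect '## Clause ' headings (each followed by a
--     # blank line) until the '---' separator; return (clauses, lines after it)
--     for i, line in enumerate(rest):
--         s = line.strip()
--         if s == '---':
--             return clauses, rest[i + 1:]
--         if s.startswith('## Clause '):
--             clauses.append(line)
--             clauses.append('')
--     return clauses, []
--
--
-- def remove_metadata_header(content: str) -> str:
--     """Remove the document metadata header but preserve chapter headings."""
--     lines = content.split('\n')
--     start = _find_header(lines)
--     if start is None:
--         return '\n'.join(lines)
--     clauses, tail = _scan([], lines[start + 1:])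
--     return '\n'.join(lines[:start] + clauses + tail)
-- ===== Notes on version B (the rewrite author's own statement) =====
-- stated objective: alternative
-- what changed: Replaced the flag-driven single pass (in_header/header_found booleans threaded through one loop) with an index-find-then-slice structure: locate the first '# ' line, scan only the header body for '## Clause ' headings up to '---', and assemble pre-slice ++ clause headings ++ post-separator slice.
import Mathlib
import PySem

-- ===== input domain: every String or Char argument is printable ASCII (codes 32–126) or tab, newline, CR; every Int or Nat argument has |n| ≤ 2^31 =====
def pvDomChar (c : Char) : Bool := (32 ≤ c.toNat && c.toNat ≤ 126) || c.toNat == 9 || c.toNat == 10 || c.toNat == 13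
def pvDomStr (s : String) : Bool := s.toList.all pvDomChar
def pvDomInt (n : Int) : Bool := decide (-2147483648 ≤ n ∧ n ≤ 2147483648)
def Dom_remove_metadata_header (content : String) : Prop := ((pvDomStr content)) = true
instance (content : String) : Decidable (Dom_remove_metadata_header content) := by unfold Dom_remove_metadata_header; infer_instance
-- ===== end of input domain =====

-- B replaces A's flag-driven single pass by find-the-header-index, scan the header body, and slice; same cost (alternative decomposition).

-- ===== PORT A =====
-- one iteration of A's for-loop over (result, in_header, header_found, clause_heading_saved)
def pvAStep (st : List String × Bool × Bool × Bool) (line : String) : List String × Bool × Bool × Bool :=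
  let (result, in_header, header_found, clause_saved) := st
  if !header_found && PySem.Str.startswith (PySem.Str.strip line) "# " then
    (result, true, true, clause_saved)
  else if in_header && PySem.Str.startswith (PySem.Str.strip line) "## Clause " then
    (result ++ [line, ""], in_header, header_found, true)
  else if in_header && (PySem.Str.strip line == "---") then
    -- the Python here runs a while loop that only computes a local j which is never read (dead code); it has no effect on the state
    (result, false, header_found, clause_saved)
  else if in_header then
    (result, in_header, header_found, clause_saved)
  else
    (result ++ [line], in_header, header_found, clause_saved)

def remove_metadata_header (content : String) : String :=
  let lines := (PySem.Str.split? content "\n").getD []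
  PySem.Str.join "\n" (lines.foldl pvAStep ([], false, false, false)).1

-- ===== PORT B =====
-- Source B's _find_header: index of the first line whose stripped form starts with '# '
def pvFindHeader : List String → Option Nat
  | [] => none
  | ln :: rest =>
    if PySem.Str.startswith (PySem.Str.strip ln) "# " then some 0
    else (pvFindHeader rest).map (· + 1)

-- Source B's _scan: collect clause headings until '---', return (clauses, lines after it)
def pvScan : List String → List String → List String × List String
  | clauses, [] => (clauses, [])
  | clauses, line :: rest =>
    let s := PySem.Str.strip line
    if s == "---" then (clauses, rest)
    else if PySem.Str.startswith s "## Clause " then pvScan (clauses ++ [line, ""]) rest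
    else pvScan clauses rest

def remove_metadata_header_alt (content : String) : String :=
  let lines := (PySem.Str.split? content "\n").getD []
  match pvFindHeader lines with
  | none => PySem.Str.join "\n" lines
  | some start =>
    -- Python slices lines[:start] and lines[start+1:] with nonnegative bounds = take/drop (exact here)
    let (clauses, tail) := pvScan [] (lines.drop (start + 1))
    PySem.Str.join "\n" (lines.take start ++ clauses ++ tail)

-- ===== PRECONDITION & SPEC =====
def Spec_remove_metadata_header (content : String) (out : String) : Prop := out = remove_metadata_header_alt content
instance (content : String) (out : String) : Decidable (Spec_remove_metadata_header content out) := by unfold Spec_remove_metadata_header; infer_instance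

-- ===== CLAIM (what is proved, stated in full; the proofs are below) =====
def Claim_equal_remove_metadata_header : Prop := ∀ (content : String), Dom_remove_metadata_header content → Spec_remove_metadata_header content (remove_metadata_header content)

-- ===== LEMMAS AND PROOFS =====

-- once the header is closed (header_found = true, in_header = false), A appends every remaining line
theorem pvA_tail (lines : List String) : ∀ (res : List String) (c : Bool),
    List.foldl pvAStep (res, false, true, c) lines = (res ++ lines, false, true, c) := by
  induction lines with
  | nil => intro res c; simp
  | cons line rest ih =>
    intro res c
    simp [pvAStep, ih]

-- a line whose stripped form equals "---" does not start with "## Clause "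
theorem pv_sep_not_clause (line : String) (h : (PySem.Str.strip line == "---") = true) :
    PySem.Chars.startswith (PySem.Chars.strip line.toList)
      ['#', '#', ' ', 'C', 'l', 'a', 'u', 's', 'e', ' '] = false := by
  have h' : PySem.Str.strip line = "---" := by simpa using h
  have h2 : PySem.Chars.strip line.toList = "---".toList := by
    rw [← PySem.Str.toList_strip, h']
  rw [h2]; decide

-- inside the header, A's accumulator evolves exactly like pvScan's
theorem pvA_header (lines : List String) : ∀ (acc : List String) (c : Bool),
    (List.foldl pvAStep (acc, true, true, c) lines).1
      = (pvScan acc lines).1 ++ (pvScan acc lines).2 := by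
  induction lines with
  | nil => intro acc c; simp [pvScan]
  | cons line rest ih =>
    intro acc c
    by_cases hsep : (PySem.Str.strip line == "---") = true
    · have hcl := pv_sep_not_clause line hsep
      simp [pvAStep, pvScan, hsep, hcl, pvA_tail]
    · by_cases hcl : PySem.Chars.startswith (PySem.Chars.strip line.toList)
          ['#', '#', ' ', 'C', 'l', 'a', 'u', 's', 'e', ' '] = true
      · simp [pvAStep, pvScan, hsep, hcl, ih]
      · simp [pvAStep, pvScan, hsep, hcl, ih]

-- pvScan's accumulator is a pure prefix
theorem pvScan_acc (rest : List String) : ∀ (a acc : List String),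
    pvScan (a ++ acc) rest = (a ++ (pvScan acc rest).1, (pvScan acc rest).2) := by
  induction rest with
  | nil => intro a acc; simp [pvScan]
  | cons line r ih =>
    intro a acc
    by_cases hsep : (PySem.Str.strip line == "---") = true
    · simp [pvScan, hsep]
    · by_cases hcl : PySem.Chars.startswith (PySem.Chars.strip line.toList)
          ['#', '#', ' ', 'C', 'l', 'a', 'u', 's', 'e', ' '] = true
      · have e1 : pvScan (a ++ acc) (line :: r) = pvScan (a ++ (acc ++ [line, ""])) r := by
          simp [pvScan, hsep, hcl, List.append_assoc]
        have e2 : pvScan acc (line :: r) = pvScan (acc ++ [line, ""]) r := by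
          simp [pvScan, hsep, hcl]
        rw [e1, e2, ih]
      · simp [pvScan, hsep, hcl, ih]

-- the list B joins, as a function of the line list
def pvAltBody (lines : List String) : List String :=
  match pvFindHeader lines with
  | none => lines
  | some start =>
      lines.take start ++ (pvScan [] (lines.drop (start + 1))).1
        ++ (pvScan [] (lines.drop (start + 1))).2

-- A's full pass computes pvAltBody
theorem pvA_main (lines : List String) : ∀ (res : List String) (c : Bool),
    (List.foldl pvAStep (res, false, false, c) lines).1 = res ++ pvAltBody lines := by
  induction lines with
  | nil => intro res c; simp [pvAltBody, pvFindHeader]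
  | cons line rest ih =>
    intro res c
    by_cases hs : PySem.Chars.startswith (PySem.Chars.strip line.toList) ['#', ' '] = true
    · have h1 : List.foldl pvAStep (res, false, false, c) (line :: rest)
          = List.foldl pvAStep (res, true, true, c) rest := by
        simp [pvAStep, hs]
      rw [h1, pvA_header rest res c]
      have h2 : pvScan res rest = (res ++ (pvScan [] rest).1, (pvScan [] rest).2) := by
        simpa using pvScan_acc rest res []
      rw [h2]
      simp [pvAltBody, pvFindHeader, hs]
    · have h1 : List.foldl pvAStep (res, false, false, c) (line :: rest)
          = List.foldl pvAStep (res ++ [line], false, false, c) rest := by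
        simp [pvAStep, hs]
      rw [h1, ih]
      cases hf : pvFindHeader rest with
      | none => simp [pvAltBody, pvFindHeader, hs, hf]
      | some k => simp [pvAltBody, pvFindHeader, hs, hf]

-- ===== VERDICT (by name: the statement is the Claim_ definition above) =====
theorem remove_metadata_header_spec : Claim_equal_remove_metadata_header := by
  intro content _
  unfold Spec_remove_metadata_header remove_metadata_header remove_metadata_header_alt
  simp only [pvA_main, List.nil_append]
  cases hf : pvFindHeader ((PySem.Str.split? content "\n").getD []) with
  | none => simp [pvAltBody, hf]
  | some k => simp [pvAltBody, hf]
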